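-- pv_equiv track=rewrite | github.com/soniakhamitkar/AdvancedPython | app.py | find_valid_frame
-- ===== SOURCE A (Python) =====
-- from typing import List, Dict, Tuple, Optional, Any
--
-- def find_valid_frame(landmarks: List[Optional[Dict]], idx: Optional[int]) -> Optional[int]:
--     """Find nearest valid frame with landmarks if the specified frame is invalid"""
--     n = len(landmarks)
--     if idx is None or idx < 0 or idx >= n:
--         return None
--
--     if landmarks[idx] is not None:
--         return idx
--
--     for offset in range(1, n):
--         prev, next_idx = idx - offset, idx + offset
--         if prev >= 0 and landmarks[prev] is not None:
--             return prev
--         if next_idx < n and landmarks[next_idx] is not None: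
--             return next_idx
--
--     return None
-- ===== SOURCE B (Python) =====
-- from typing import List, Dict, Tuple, Optional, Any
--
-- def _scan_left(landmarks, j):
--     while j >= 0:
--         if landmarks[j] is not None:
--             return j
--         j -= 1
--     return None
--
-- def _scan_right(landmarks, n, j):
--     while j < n:
--         if landmarks[j] is not None:
--             return j
--         j += 1
--     return None
--
-- def find_valid_frame(landmarks: List[Optional[Dict]], idx: Optional[int]) -> Optional[int]:
--     """Find nearest valid frame with landmarks if the specified frame is invalid"""
--     n = len(landmarks)
--     if idx is None or idx < 0 or idx >= n:
--         return None
--     if landmarks[idx] is not None: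
--         return idx
--     prev = _scan_left(landmarks, idx - 1)
--     nxt = _scan_right(landmarks, n, idx + 1)
--     if prev is None:
--         return nxt
--     if nxt is None:
--         return prev
--     return prev if idx - prev <= nxt - idx else nxt
-- ===== Notes on version B (the rewrite author's own statement) =====
-- stated objective: alternative
-- what changed: Replaced A's single expanding-offset loop (which interleaves both directions and re-tests the same bounds each iteration) by two independent directional scans for the nearest valid neighbour on each side, followed by a distance comparison with ties going to the left.
import Mathlib
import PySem

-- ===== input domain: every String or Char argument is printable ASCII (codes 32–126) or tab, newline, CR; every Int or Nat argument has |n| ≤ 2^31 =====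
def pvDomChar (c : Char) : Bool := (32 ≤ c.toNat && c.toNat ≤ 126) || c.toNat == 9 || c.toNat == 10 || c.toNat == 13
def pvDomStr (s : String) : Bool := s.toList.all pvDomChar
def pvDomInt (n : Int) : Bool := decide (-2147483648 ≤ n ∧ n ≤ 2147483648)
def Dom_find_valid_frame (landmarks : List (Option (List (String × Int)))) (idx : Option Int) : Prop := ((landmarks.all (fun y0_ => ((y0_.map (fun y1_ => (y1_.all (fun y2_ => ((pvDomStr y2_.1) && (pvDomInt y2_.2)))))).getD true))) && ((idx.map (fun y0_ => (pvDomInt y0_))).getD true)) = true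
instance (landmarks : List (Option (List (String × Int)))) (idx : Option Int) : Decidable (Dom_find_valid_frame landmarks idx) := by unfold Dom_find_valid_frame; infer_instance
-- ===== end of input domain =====

-- B replaces A's single expanding-offset loop by two independent directional scans plus a
-- final distance comparison (tie to the left); alternative decomposition, same O(n) cost.


-- ===== PORT A =====
-- `landmarks[j] is not None` (j known in range): pyGet? yields `some (some _)` exactly then.
def pvValid (landmarks : List (Option (List (String × Int)))) (j : Int) : Bool :=
  ((PySem.List.pyGet? landmarks j).join).isSome

-- A's `for offset in range(1, n)` loop with its two early returns, as recursion on offset.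
def pvLoopA (landmarks : List (Option (List (String × Int)))) (n i : Int) (offset : Int) : Option Int :=
  if h : offset < n then
    if i - offset ≥ 0 ∧ pvValid landmarks (i - offset) then some (i - offset)
    else if i + offset < n ∧ pvValid landmarks (i + offset) then some (i + offset)
    else pvLoopA landmarks n i (offset + 1)
  else none
termination_by (n - offset).toNat
decreasing_by omega

def find_valid_frame (landmarks : List (Option (List (String × Int)))) (idx : Option Int) : Option Int :=
  let n : Int := landmarks.length
  match idx with
  | none => none
  | some i =>
    if i < 0 ∨ i ≥ n then none
    else if pvValid landmarks i then some i
    else pvLoopA landmarks n i 1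

-- ===== PORT B =====
-- `_scan_left`: walk j down to 0, first valid index wins.
def pvScanL (landmarks : List (Option (List (String × Int)))) (j : Int) : Option Int :=
  if h : j ≥ 0 then
    if pvValid landmarks j then some j else pvScanL landmarks (j - 1)
  else none
termination_by (j + 1).toNat
decreasing_by omega

-- `_scan_right`: walk j up to n-1, first valid index wins.
def pvScanR (landmarks : List (Option (List (String × Int)))) (n : Int) (j : Int) : Option Int :=
  if h : j < n then
    if pvValid landmarks j then some j else pvScanR landmarks n (j + 1)
  else none
termination_by (n - j).toNat
decreasing_by omega

def find_valid_frame_alt (landmarks : List (Option (List (String × Int)))) (idx : Option Int) : Option Int :=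
  let n : Int := landmarks.length
  match idx with
  | none => none
  | some i =>
    if i < 0 ∨ i ≥ n then none
    else if pvValid landmarks i then some i
    else
      match pvScanL landmarks (i - 1), pvScanR landmarks n (i + 1) with
      | none, q => q
      | some a, none => some a
      | some a, some b => if i - a ≤ b - i then some a else some b

-- ===== PRECONDITION & SPEC =====
def Spec_find_valid_frame (landmarks : List (Option (List (String × Int)))) (idx : Option Int) (out : Option Int) : Prop := out = find_valid_frame_alt landmarks idx
instance (landmarks : List (Option (List (String × Int)))) (idx : Option Int) (out : Option Int) : Decidable (Spec_find_valid_frame landmarks idx out) := by unfold Spec_find_valid_frame; infer_instance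

-- ===== CLAIM (what is proved, stated in full; the proofs are below) =====
def Claim_equal_find_valid_frame : Prop := ∀ (landmarks : List (Option (List (String × Int)))) (idx : Option Int), Dom_find_valid_frame landmarks idx → Spec_find_valid_frame landmarks idx (find_valid_frame landmarks idx)

-- ===== LEMMAS AND PROOFS =====

theorem pvScanL_le (landmarks : List (Option (List (String × Int)))) (j a : Int)
    (h : pvScanL landmarks j = some a) : a ≤ j := by
  induction j using pvScanL.induct landmarks with
  | case1 j hj hv =>
    rw [pvScanL, dif_pos hj, if_pos hv] at h
    cases h; omega
  | case2 j hj hv ih =>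
    rw [pvScanL, dif_pos hj, if_neg hv] at h
    have := ih h; omega
  | case3 j hj =>
    rw [pvScanL, dif_neg hj] at h; cases h

theorem pvScanR_ge (landmarks : List (Option (List (String × Int)))) (n j b : Int)
    (h : pvScanR landmarks n j = some b) : j ≤ b := by
  induction j using pvScanR.induct landmarks n with
  | case1 j hj hv =>
    rw [pvScanR, dif_pos hj, if_pos hv] at h; cases h; omega
  | case2 j hj hv ih =>
    rw [pvScanR, dif_pos hj, if_neg hv] at h
    have := ih h; omega
  | case3 j hj =>
    rw [pvScanR, dif_neg hj] at h; cases h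

-- combine, as B writes it inline
def pvCombine (i : Int) : Option Int → Option Int → Option Int
  | none, q => q
  | some a, none => some a
  | some a, some b => if i - a ≤ b - i then some a else some b

theorem pvLoop_eq_scans (landmarks : List (Option (List (String × Int)))) (n i : Int)
    (hi0 : 0 ≤ i) (hin : i < n) :
    ∀ k : Int, 1 ≤ k →
      pvLoopA landmarks n i k =
        pvCombine i (pvScanL landmarks (i - k)) (pvScanR landmarks n (i + k)) := by
  have H : ∀ m : Nat, ∀ k : Int, 1 ≤ k → (n - k).toNat ≤ m →
      pvLoopA landmarks n i k =
        pvCombine i (pvScanL landmarks (i - k)) (pvScanR landmarks n (i + k)) := by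
    intro m
    induction m with
    | zero =>
      intro k hk hm
      rw [pvLoopA, dif_neg (by omega : ¬ k < n),
        show pvScanL landmarks (i - k) = none from by rw [pvScanL, dif_neg (by omega)],
        show pvScanR landmarks n (i + k) = none from by rw [pvScanR, dif_neg (by omega)]]
      rfl
    | succ m ih =>
      intro k hk hm
      by_cases hkn : k < n
      · rw [pvLoopA, dif_pos hkn]
        by_cases hp : i - k ≥ 0 ∧ pvValid landmarks (i - k) = true
        · rw [if_pos hp,
            show pvScanL landmarks (i - k) = some (i - k) from by
              rw [pvScanL, dif_pos hp.1, if_pos hp.2]]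
          cases hq : pvScanR landmarks n (i + k) with
          | none => rfl
          | some b =>
            have hb := pvScanR_ge landmarks n (i + k) b hq
            simp only [pvCombine]
            rw [if_pos (by omega)]
        · rw [if_neg hp]
          by_cases hq : i + k < n ∧ pvValid landmarks (i + k) = true
          · rw [if_pos hq,
              show pvScanR landmarks n (i + k) = some (i + k) from by
                rw [pvScanR, dif_pos hq.1, if_pos hq.2]]
            by_cases hge : i - k ≥ 0
            · have hv : ¬ pvValid landmarks (i - k) = true := fun hv => hp ⟨hge, hv⟩
              rw [show pvScanL landmarks (i - k) = pvScanL landmarks (i - k - 1) from by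
                rw [pvScanL, dif_pos hge, if_neg hv]]
              cases ha : pvScanL landmarks (i - k - 1) with
              | none => rfl
              | some a =>
                have hal := pvScanL_le landmarks (i - k - 1) a ha
                simp only [pvCombine]
                rw [if_neg (by omega)]
            · rw [show pvScanL landmarks (i - k) = none from by rw [pvScanL, dif_neg hge]]
              rfl
          · rw [if_neg hq]
            have hL : pvScanL landmarks (i - k) = pvScanL landmarks (i - (k + 1)) := by
              by_cases hge : i - k ≥ 0
              · have hv : ¬ pvValid landmarks (i - k) = true := fun hv => hp ⟨hge, hv⟩
                rw [pvScanL, dif_pos hge, if_neg hv,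
                  show i - k - 1 = i - (k + 1) from by omega]
              · rw [pvScanL, dif_neg hge, pvScanL, dif_neg (by omega : ¬ i - (k + 1) ≥ 0)]
            have hR : pvScanR landmarks n (i + k) = pvScanR landmarks n (i + (k + 1)) := by
              by_cases hlt : i + k < n
              · have hv : ¬ pvValid landmarks (i + k) = true := fun hv => hq ⟨hlt, hv⟩
                rw [pvScanR, dif_pos hlt, if_neg hv,
                  show i + k + 1 = i + (k + 1) from by omega]
              · rw [pvScanR, dif_neg hlt, pvScanR, dif_neg (by omega : ¬ i + (k + 1) < n)]
            rw [hL, hR]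
            exact ih (k + 1) (by omega) (by omega)
      · rw [pvLoopA, dif_neg hkn,
          show pvScanL landmarks (i - k) = none from by rw [pvScanL, dif_neg (by omega)],
          show pvScanR landmarks n (i + k) = none from by rw [pvScanR, dif_neg (by omega)]]
        rfl
  intro k hk
  exact H (n - k).toNat k hk le_rfl

-- ===== VERDICT (by name: the statement is the Claim_ definition above) =====
theorem find_valid_frame_spec : Claim_equal_find_valid_frame := by
  intro landmarks idx _
  unfold Spec_find_valid_frame find_valid_frame find_valid_frame_alt
  cases idx with
  | none => rfl
  | some i =>
    simp only
    by_cases hb : i < 0 ∨ i ≥ (landmarks.length : Int)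
    · rw [if_pos hb, if_pos hb]
    · rw [if_neg hb, if_neg hb]
      by_cases hv : pvValid landmarks i = true
      · rw [if_pos hv, if_pos hv]
      · rw [if_neg hv, if_neg hv]
        rw [pvLoop_eq_scans landmarks (landmarks.length : Int) i (by omega) (by omega) 1 le_rfl]
        cases pvScanL landmarks (i - 1) <;>
          cases pvScanR landmarks (landmarks.length : Int) (i + 1) <;>
          simp [pvCombine]
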